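-- pv_equiv track=rewrite | github.com/zilunzhang/DetailCLIP | cc_algo.py | index_of_last_apperance
-- ===== SOURCE A (Python) =====
-- def index_of_last_apperance(patch_size_list):
--     rd = dict()
--     for i, ele in enumerate(patch_size_list):
--         if ele not in rd:
--             rd[ele] = [i]
--         else:
--             rd[ele].append(i)
--     rl = []
--     vl = []
--     for key in rd:
--         rl.append(max(rd[key]))
--         vl.append(key)
--     return rl, vl
-- ===== SOURCE B (Python) =====
-- def index_of_last_apperance(patch_size_list):
--     rd = {}
--     for i, ele in enumerate(patch_size_list):
--         rd[ele] = i
--     return list(rd.values()), list(rd.keys())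
-- ===== Notes on version B (the rewrite author's own statement) =====
-- stated objective: simpler
-- what changed: B replaces A's dict of per-key index lists plus a second max-aggregation loop with a single pass that overwrites rd[ele]=i (the last write is the max since indices increase), returning the dict's values and keys directly.
import Mathlib
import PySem

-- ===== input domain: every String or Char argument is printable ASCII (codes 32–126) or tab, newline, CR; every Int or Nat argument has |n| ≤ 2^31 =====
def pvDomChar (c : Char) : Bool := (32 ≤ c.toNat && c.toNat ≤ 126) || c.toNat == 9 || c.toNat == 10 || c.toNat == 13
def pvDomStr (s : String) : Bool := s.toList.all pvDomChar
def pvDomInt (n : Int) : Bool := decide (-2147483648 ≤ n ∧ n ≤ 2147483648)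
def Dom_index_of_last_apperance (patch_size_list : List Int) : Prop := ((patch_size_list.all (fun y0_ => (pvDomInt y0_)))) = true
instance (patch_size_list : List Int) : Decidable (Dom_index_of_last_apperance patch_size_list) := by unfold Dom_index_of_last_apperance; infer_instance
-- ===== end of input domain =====

-- B replaces A's dict of per-key index lists plus a second max-aggregation loop with a
-- single overwrite pass, returning the dict's values and keys directly (simpler).

-- ===== PORT A =====
-- max(rd[key]); rd[key] is never empty in A, so the `.getD 0` default is never used
def pyMaxD (l : List Int) : Int := (PySem.List.max? l (fun y => y)).getD 0

def index_of_last_apperance (patch_size_list : List Int) : List Int × List Int :=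
  let rd : PySem.Dict Int (List Int) :=
    (PySem.List.enumerate patch_size_list 0).foldl
      (fun d p =>
        if d.contains p.2 = false then d.insert p.2 [p.1]
        else d.modify p.2 [] (fun t => t ++ [p.1]))
      PySem.Dict.empty
  rd.keys.foldl (fun acc k => (acc.1 ++ [pyMaxD (rd.getD k [])], acc.2 ++ [k])) ([], [])

-- ===== PORT B =====
def index_of_last_apperance_alt (patch_size_list : List Int) : List Int × List Int :=
  let rd : PySem.Dict Int Int :=
    (PySem.List.enumerate patch_size_list 0).foldl
      (fun d p => d.insert p.2 p.1) PySem.Dict.empty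
  (rd.values, rd.keys)

-- ===== PRECONDITION & SPEC =====
def Spec_index_of_last_apperance (patch_size_list : List Int) (out : List Int × List Int) : Prop := out = index_of_last_apperance_alt patch_size_list
instance (patch_size_list : List Int) (out : List Int × List Int) : Decidable (Spec_index_of_last_apperance patch_size_list out) := by unfold Spec_index_of_last_apperance; infer_instance

-- ===== CLAIM (what is proved, stated in full; the proofs are below) =====
def Claim_equal_index_of_last_apperance : Prop := ∀ (patch_size_list : List Int), Dom_index_of_last_apperance patch_size_list → Spec_index_of_last_apperance patch_size_list (index_of_last_apperance patch_size_list)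

-- ===== LEMMAS AND PROOFS =====

-- A's output loop over the keys is an append-only fold: it is the pair of maps.
lemma foldl_pair_append (ks : List Int) (f : Int → Int) (a b : List Int) :
    ks.foldl (fun acc k => (acc.1 ++ [f k], acc.2 ++ [k])) (a, b)
      = (a ++ ks.map f, b ++ ks) := by
  induction ks generalizing a b with
  | nil => simp
  | cons k t ih => simp [List.foldl_cons, ih]

lemma pyMaxD_singleton (i : Int) : pyMaxD [i] = i := by
  simp [pyMaxD, PySem.List.max?]

lemma pyMaxD_append (l : List Int) (hl : l ≠ []) (i : Int)
    (hlt : ∀ j ∈ l, j < i) : pyMaxD (l ++ [i]) = i := by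
  obtain ⟨x, t, rfl⟩ := List.exists_cons_of_ne_nil hl
  have h1 : pyMaxD (x :: t ++ [i]) = (t ++ [i]).foldl max x := by
    simp [pyMaxD, PySem.List.max?_id_cons]
  rw [h1, List.foldl_append]
  simp only [List.foldl_cons, List.foldl_nil]
  have hx : x ∈ x :: t := List.mem_cons_self ..
  have hmem : (t.foldl max x) = x ∨ (t.foldl max x) ∈ t := by
    have : pyMaxD (x :: t) ∈ x :: t := by
      have := PySem.List.max?_mem (xs := x :: t) (key := fun y => y)
        (m := (x :: t).foldl max x)
      simp [pyMaxD, PySem.List.max?_id_cons] at this ⊢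
      simpa using this
    simpa [pyMaxD, PySem.List.max?_id_cons] using this
  have : t.foldl max x < i := by
    rcases hmem with h | h
    · rw [h]; exact hlt x hx
    · exact hlt _ (List.mem_cons_of_mem _ h)
  omega

-- The loop invariant: A's dict and B's dict have the same key list; for every present
-- key, A's list of indices is nonempty, its max is B's stored value, and all its
-- indices are below the next enumeration index n.
lemma loop_inv (xs : List Int) (n : Int)
    (dA : PySem.Dict Int (List Int)) (dB : PySem.Dict Int Int)
    (hk : dA.keys = dB.keys)
    (hv : ∀ k, dA.contains k = true →
      dA.getD k [] ≠ [] ∧ pyMaxD (dA.getD k []) = dB.getD k 0 ∧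
      ∀ j ∈ dA.getD k [], j < n) :
    (((PySem.List.enumerate xs n).foldl
        (fun d p =>
          if d.contains p.2 = false then d.insert p.2 [p.1]
          else d.modify p.2 [] (fun t => t ++ [p.1])) dA).keys
      = ((PySem.List.enumerate xs n).foldl (fun d p => d.insert p.2 p.1) dB).keys)
    ∧ ∀ k,
      ((PySem.List.enumerate xs n).foldl
        (fun d p =>
          if d.contains p.2 = false then d.insert p.2 [p.1]
          else d.modify p.2 [] (fun t => t ++ [p.1])) dA).contains k = true →
      pyMaxD (((PySem.List.enumerate xs n).foldl
        (fun d p =>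
          if d.contains p.2 = false then d.insert p.2 [p.1]
          else d.modify p.2 [] (fun t => t ++ [p.1])) dA).getD k [])
        = ((PySem.List.enumerate xs n).foldl (fun d p => d.insert p.2 p.1) dB).getD k 0 := by
  induction xs generalizing n dA dB with
  | nil =>
    simp only [PySem.List.enumerate_nil, List.foldl_nil]
    exact ⟨hk, fun k h => (hv k h).2.1⟩
  | cons x t ih =>
    rw [PySem.List.enumerate_cons]
    simp only [List.foldl_cons]
    have hcB : dB.contains x = dA.contains x := by
      rw [PySem.Dict.contains_eq_decide_mem_keys, PySem.Dict.contains_eq_decide_mem_keys, hk]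
    by_cases hc : dA.contains x = true
    · -- key present: A modifies, B overwrites
      rw [if_neg (by simp [hc])]
      obtain ⟨hne, hmax, hbnd⟩ := hv x hc
      apply ih
      · rw [PySem.Dict.keys_modify, PySem.Dict.keys_insert_of_contains _ _ hc,
            PySem.Dict.keys_insert_of_contains _ _ (show dB.contains x = true by rw [hcB]; exact hc)]
        exact hk
      · intro k hk'
        by_cases hkx : k = x
        · subst hkx
          rw [PySem.Dict.getD_modify_self, PySem.Dict.getD_insert_self]
          refine ⟨by simp, ?_, ?_⟩
          · exact pyMaxD_append _ hne n hbnd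
          · intro j hj
            rcases List.mem_append.mp hj with h | h
            · have := hbnd j h; omega
            · simp at h; omega
        · rw [PySem.Dict.getD_modify, PySem.Dict.getD_insert, if_neg hkx, if_neg hkx]
          have hck : dA.contains k = true := by
            rw [PySem.Dict.contains_modify] at hk'
            simpa [hkx] using hk'
          obtain ⟨h1, h2, h3⟩ := hv k hck
          exact ⟨h1, h2, fun j hj => by have := h3 j hj; omega⟩
    · -- fresh key: both insert
      rw [if_pos (by simpa using hc)]
      apply ih
      · rw [PySem.Dict.keys_insert_of_not_contains _ _ (by simpa using hc),
            PySem.Dict.keys_insert_of_not_contains _ _ (by rw [hcB]; simpa using hc), hk]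
      · intro k hk'
        by_cases hkx : k = x
        · subst hkx
          rw [PySem.Dict.getD_insert_self, PySem.Dict.getD_insert_self]
          refine ⟨by simp, pyMaxD_singleton n, ?_⟩
          intro j hj; simp at hj; omega
        · rw [PySem.Dict.getD_insert, PySem.Dict.getD_insert, if_neg hkx, if_neg hkx]
          have hck : dA.contains k = true := by
            rw [PySem.Dict.contains_insert] at hk'
            simpa [hkx] using hk'
          obtain ⟨h1, h2, h3⟩ := hv k hck
          exact ⟨h1, h2, fun j hj => by have := h3 j hj; omega⟩

-- ===== VERDICT (by name: the statement is the Claim_ definition above) =====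
theorem index_of_last_apperance_spec : Claim_equal_index_of_last_apperance := by
  intro xs _
  unfold Spec_index_of_last_apperance index_of_last_apperance index_of_last_apperance_alt
  set dA := (PySem.List.enumerate xs 0).foldl
      (fun d p =>
        if d.contains p.2 = false then d.insert p.2 [p.1]
        else d.modify p.2 [] (fun t => t ++ [p.1]))
      (PySem.Dict.empty : PySem.Dict Int (List Int)) with hdA
  set dB := (PySem.List.enumerate xs 0).foldl (fun d p => d.insert p.2 p.1)
      (PySem.Dict.empty : PySem.Dict Int Int) with hdB
  obtain ⟨hk, hv⟩ := loop_inv xs 0 PySem.Dict.empty PySem.Dict.empty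
    (by simp) (by intro k h; simp [PySem.Dict.contains_empty] at h)
  rw [← hdA, ← hdB] at hk hv
  have hnd : dB.keys.Nodup := by
    rw [hdB]
    exact PySem.Dict.nodup_keys_foldl_insert_key (PySem.List.enumerate xs 0)
      (fun p : Int × Int => p.2) (fun d p => p.1) PySem.Dict.empty
      PySem.Dict.nodup_keys_empty
  change dA.keys.foldl (fun acc k => (acc.1 ++ [pyMaxD (dA.getD k [])], acc.2 ++ [k])) ([], [])
      = (dB.values, dB.keys)
  rw [foldl_pair_append, PySem.Dict.values_eq_map_keys dB hnd 0]
  simp only [List.nil_append]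
  refine Prod.ext ?_ (by simpa using hk)
  rw [hk]
  exact List.map_congr_left (fun k hkmem => hv k
    (by rw [PySem.Dict.contains_eq_decide_mem_keys, hk]; simpa using hkmem))
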